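-- pv_equiv track=rewrite | github.com/kolike/jira-dashboard-desktop | analytics.py | tokenize_summary
-- ===== SOURCE A (Python) =====
-- def tokenize_summary(text: str) -> set[str]:
--     stopwords = {
--         "и", "или", "для", "что", "как", "это", "при", "надо", "нужно",
--         "the", "and", "for", "with", "from", "user", "jira",
--     }
--     tokens = set()
--     for raw in text.lower().replace("/", " ").replace("-", " ").split():
--         token = "".join(ch for ch in raw if ch.isalnum())
--         if len(token) >= 4 and token not in stopwords:
--             tokens.add(token)
--     return tokens
-- ===== SOURCE B (Python) =====
-- def tokenize_summary(text: str) -> set[str]: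
--     stopwords = {
--         "и", "или", "для", "что", "как", "это", "при", "надо", "нужно",
--         "the", "and", "for", "with", "from", "user", "jira",
--     }
--     tokens = set()
--     buf = []
--
--     def flush():
--         token = "".join(buf)
--         buf.clear()
--         if len(token) >= 4 and token not in stopwords:
--             tokens.add(token)
--
--     for ch in text.lower():
--         if ch.isspace() or ch == "/" or ch == "-":
--             flush()
--         elif ch.isalnum():
--             buf.append(ch)
--     flush()
--     return tokens
-- ===== Notes on version B (the rewrite author's own statement) =====
-- stated objective: alternative
-- what changed: Replaced lower+two replace passes+split+per-token filtered join with a single character-scanning state machine over text.lower() that keeps one buffer of alnum chars and flushes it at whitespace/'/'/'-'.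
import Mathlib
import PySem

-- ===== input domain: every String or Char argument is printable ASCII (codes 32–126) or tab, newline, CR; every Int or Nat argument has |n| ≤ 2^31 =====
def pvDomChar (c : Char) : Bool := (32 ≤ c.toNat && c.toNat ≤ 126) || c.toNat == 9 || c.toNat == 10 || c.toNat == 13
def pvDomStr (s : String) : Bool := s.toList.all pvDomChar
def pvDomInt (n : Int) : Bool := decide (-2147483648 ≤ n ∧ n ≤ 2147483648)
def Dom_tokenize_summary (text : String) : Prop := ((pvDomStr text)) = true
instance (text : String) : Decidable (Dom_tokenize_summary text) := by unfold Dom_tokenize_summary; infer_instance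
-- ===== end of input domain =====

-- B replaces A's lower+replace+replace+split+per-token-join pipeline with one character-scanning
-- state machine over the lowered text (objective: alternative single-pass algorithm).

-- ===== PORT A =====
def tokenize_summary (text : String) : List String :=
  let stopwords : PySem.Set String := PySem.Set.ofList
    ["и", "или", "для", "что", "как", "это", "при", "надо", "нужно",
     "the", "and", "for", "with", "from", "user", "jira"]
  let raws := PySem.Chars.split₀
    (PySem.Chars.replace (PySem.Chars.replace (PySem.Chars.lower text.toList) ['/'] [' ']) ['-'] [' '])
  raws.foldl
    (fun tokens raw =>
      let token := String.ofList (raw.filter PySem.Chars.isalnum)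
      if 4 ≤ PySem.Str.len token ∧ PySem.Set.contains stopwords token = false then
        PySem.Set.add tokens token
      else tokens)
    PySem.Set.empty

-- ===== PORT B =====
def tokenize_summary_alt (text : String) : List String :=
  let stopwords : PySem.Set String := PySem.Set.ofList
    ["и", "или", "для", "что", "как", "это", "при", "надо", "нужно",
     "the", "and", "for", "with", "from", "user", "jira"]
  let flush : PySem.Set String → List Char → PySem.Set String := fun tokens buf =>
    let token := String.ofList buf
    if 4 ≤ PySem.Str.len token ∧ PySem.Set.contains stopwords token = false then
      PySem.Set.add tokens token
    else tokens
  let step : PySem.Set String × List Char → Char → PySem.Set String × List Char := fun st ch =>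
    if PySem.Chars.isspace ch || ch == '/' || ch == '-' then (flush st.1 st.2, [])
    else if PySem.Chars.isalnum ch then (st.1, st.2 ++ [ch])
    else st
  let fin := (PySem.Chars.lower text.toList).foldl step (PySem.Set.empty, [])
  flush fin.1 fin.2

-- ===== PRECONDITION & SPEC =====
def Spec_tokenize_summary (text : String) (out : List String) : Prop := out = tokenize_summary_alt text
instance (text : String) (out : List String) : Decidable (Spec_tokenize_summary text out) := by unfold Spec_tokenize_summary; infer_instance

-- ===== CLAIM (what is proved, stated in full; the proofs are below) =====
def Claim_equal_tokenize_summary : Prop := ∀ (text : String), Dom_tokenize_summary text → Spec_tokenize_summary text (tokenize_summary text)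

-- ===== LEMMAS AND PROOFS =====

def pvStop : PySem.Set String := PySem.Set.ofList
  ["и", "или", "для", "что", "как", "это", "при", "надо", "нужно",
   "the", "and", "for", "with", "from", "user", "jira"]

def pvFlush (tokens : PySem.Set String) (buf : List Char) : PySem.Set String :=
  if 4 ≤ PySem.Str.len (String.ofList buf) ∧ PySem.Set.contains pvStop (String.ofList buf) = false then
    PySem.Set.add tokens (String.ofList buf)
  else tokens

def pvG (tokens : PySem.Set String) (raw : List Char) : PySem.Set String :=
  pvFlush tokens (raw.filter PySem.Chars.isalnum)

-- the replacement '/'↦' ', '-'↦' ' as a char map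
def pvRepl (c : Char) : Char := if c == '/' then ' ' else if c == '-' then ' ' else c

-- split₀.go with the emitted-words accumulator factored out
def pvSplitC : List Char → List Char → List (List Char)
  | [], cur => if cur.isEmpty then [] else [cur.reverse]
  | c :: rest, cur =>
    if PySem.Chars.isspace c then
      (if cur.isEmpty then pvSplitC rest [] else cur.reverse :: pvSplitC rest [])
    else pvSplitC rest (c :: cur)

-- the state machine B implements, as a structural recursion
def pvM : List Char → List Char → PySem.Set String → PySem.Set String
  | [], buf, tokens => pvFlush tokens buf
  | c :: cs, buf, tokens =>
    if PySem.Chars.isspace c || c == '/' || c == '-' then pvM cs [] (pvFlush tokens buf)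
    else if PySem.Chars.isalnum c then pvM cs (buf ++ [c]) tokens
    else pvM cs buf tokens

theorem pvReplace_go_single (c0 c1 : Char) :
    ∀ (fuel : Nat) (l acc : List Char), l.length ≤ fuel →
      PySem.Chars.replace.go [c0] [c1] fuel l acc
        = acc.reverse ++ l.map (fun c => if c == c0 then c1 else c) := by
  intro fuel
  induction fuel with
  | zero =>
    intro l acc h
    have : l = [] := List.eq_nil_of_length_eq_zero (Nat.le_zero.mp h)
    subst this; simp [PySem.Chars.replace.go]
  | succ n ih =>
    intro l acc h
    cases l with
    | nil => simp [PySem.Chars.replace.go]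
    | cons c t =>
      simp only [PySem.Chars.replace.go]
      by_cases hc : c = c0
      · subst hc
        have hpre : List.isPrefixOf [c] (c :: t) = true := by
          simp [List.isPrefixOf]
        rw [if_pos hpre]
        have := ih t (c1 :: acc) (by simpa using Nat.le_of_succ_le_succ h)
        simp only [List.length_nil, List.drop_zero, List.reverse_singleton,
          List.singleton_append, List.length_cons, List.drop_succ_cons]
        rw [this]
        simp
      · have hpre : List.isPrefixOf [c0] (c :: t) = false := by
          simp [List.isPrefixOf]
          intro hh; exact absurd hh.symm hc
        rw [if_neg (by simp [hpre])]
        rw [ih t (c :: acc) (by simpa using Nat.le_of_succ_le_succ h)]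
        simp [hc]

theorem pvReplace_single (c0 c1 : Char) (cs : List Char) :
    PySem.Chars.replace cs [c0] [c1] = cs.map (fun c => if c == c0 then c1 else c) := by
  simp only [PySem.Chars.replace, List.isEmpty_cons]
  rw [if_neg (by simp)]
  simpa using pvReplace_go_single c0 c1 cs.length cs [] le_rfl

theorem pvReplace_both (cs : List Char) :
    PySem.Chars.replace (PySem.Chars.replace cs ['/'] [' ']) ['-'] [' '] = cs.map pvRepl := by
  rw [pvReplace_single, pvReplace_single, List.map_map]
  apply List.map_congr_left
  intro c _
  by_cases h1 : c = '/'
  · subst h1; simp [pvRepl]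
  · by_cases h2 : c = '-'
    · subst h2; simp [pvRepl]
    · simp [pvRepl, h1, h2]

theorem pvSplit_go_spec :
    ∀ (l cur : List Char) (accW : List (List Char)),
      PySem.Chars.split₀.go l cur accW = accW.reverse ++ pvSplitC l cur := by
  intro l
  induction l with
  | nil =>
    intro cur accW
    by_cases h : cur.isEmpty
    · simp [PySem.Chars.split₀.go, pvSplitC, h]
    · simp [PySem.Chars.split₀.go, pvSplitC, h]
  | cons c rest ih =>
    intro cur accW
    simp only [PySem.Chars.split₀.go, pvSplitC]
    by_cases hs : PySem.Chars.isspace c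
    · rw [if_pos hs, if_pos hs]
      by_cases he : cur.isEmpty
      · rw [if_pos he, if_pos he, ih [] accW]
      · rw [if_neg he, if_neg he, ih [] (cur.reverse :: accW)]
        simp
    · rw [if_neg hs, if_neg hs, ih (c :: cur) accW]

theorem pvSplit₀_eq (cs : List Char) : PySem.Chars.split₀ cs = pvSplitC cs [] := by
  simpa using pvSplit_go_spec cs [] []

theorem pvFlush_nil (tokens : PySem.Set String) : pvFlush tokens [] = tokens := by
  simp [pvFlush, PySem.Str.len]

theorem pvRepl_sep (c : Char) :
    PySem.Chars.isspace (pvRepl c) = (PySem.Chars.isspace c || c == '/' || c == '-') := by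
  by_cases h1 : c = '/'
  · subst h1; simp [pvRepl]; decide
  · by_cases h2 : c = '-'
    · subst h2; simp [pvRepl]; decide
    · have hs1 : (c == '/') = false := by simp [h1]
      have hs2 : (c == '-') = false := by simp [h2]
      simp [pvRepl, hs1, hs2]

theorem pvRepl_id (c : Char) (h1 : (c == '/') = false) (h2 : (c == '-') = false) :
    pvRepl c = c := by
  simp [pvRepl, h1, h2]

-- the heart: folding A's body over the words of the replaced text IS B's state machine
theorem pvMain :
    ∀ (cs cur : List Char) (tokens : PySem.Set String),
      (pvSplitC (cs.map pvRepl) cur).foldl pvG tokens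
        = pvM cs ((cur.filter PySem.Chars.isalnum).reverse) tokens := by
  intro cs
  induction cs with
  | nil =>
    intro cur tokens
    by_cases he : cur.isEmpty
    · have : cur = [] := by simpa [List.isEmpty_iff] using he
      subst this
      simp [pvSplitC, pvM, pvFlush_nil]
    · simp only [List.map_nil, pvSplitC, he, if_neg, Bool.false_eq_true, not_false_iff]
      simp [pvM, pvG, List.filter_reverse]
  | cons c rest ih =>
    intro cur tokens
    simp only [List.map_cons, pvSplitC, pvM, pvRepl_sep]
    by_cases hsep : (PySem.Chars.isspace c || c == '/' || c == '-') = true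
    · rw [if_pos hsep, if_pos hsep]
      by_cases he : cur.isEmpty
      · have : cur = [] := by simpa [List.isEmpty_iff] using he
        subst this
        rw [if_pos (by simp)]
        rw [ih [] tokens]
        simp [pvFlush_nil]
      · rw [if_neg he]
        simp only [List.foldl_cons]
        rw [ih [] (pvG tokens cur.reverse)]
        simp [pvG, List.filter_reverse]
    · have hsep' : (PySem.Chars.isspace c || c == '/' || c == '-') = false := by
        simpa using hsep
      have h1 : (c == '/') = false := by
        cases h : (c == '/') <;> simp_all
      have h2 : (c == '-') = false := by
        cases h : (c == '-') <;> simp_all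
      have hnot : ¬((PySem.Chars.isspace c || c == '/' || c == '-') = true) := by
        rw [hsep']; exact Bool.false_ne_true
      rw [if_neg hnot, pvRepl_id c h1 h2, if_neg hnot]
      rw [ih (c :: cur) tokens]
      by_cases ha : PySem.Chars.isalnum c
      · rw [if_pos ha]
        simp [ha]
      · rw [if_neg ha]
        have ha' : PySem.Chars.isalnum c = false := by simpa using ha
        simp [ha']

-- B's foldl-with-pair-state equals the structural machine
theorem pvAlt_eq_M :
    ∀ (cs buf : List Char) (tokens : PySem.Set String),
      (let fin := cs.foldl
          (fun st ch =>
            if PySem.Chars.isspace ch || ch == '/' || ch == '-' then (pvFlush st.1 st.2, [])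
            else if PySem.Chars.isalnum ch then (st.1, st.2 ++ [ch])
            else st)
          (tokens, buf)
       pvFlush fin.1 fin.2) = pvM cs buf tokens := by
  intro cs
  induction cs with
  | nil => intro buf tokens; simp [pvM]
  | cons c rest ih =>
    intro buf tokens
    simp only [List.foldl_cons, pvM]
    by_cases hsep : (PySem.Chars.isspace c || c == '/' || c == '-') = true
    · rw [if_pos hsep, if_pos hsep]; exact ih [] (pvFlush tokens buf)
    · rw [if_neg hsep, if_neg hsep]
      by_cases ha : PySem.Chars.isalnum c
      · rw [if_pos ha, if_pos ha]; exact ih (buf ++ [c]) tokens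
      · rw [if_neg ha, if_neg ha]; exact ih buf tokens

-- ===== VERDICT (by name: the statement is the Claim_ definition above) =====
set_option maxHeartbeats 1000000 in
theorem tokenize_summary_spec : Claim_equal_tokenize_summary := by
  intro text _
  unfold Spec_tokenize_summary
  have hA' : tokenize_summary text
      = pvM (PySem.Chars.lower text.toList) [] PySem.Set.empty := by
    show (PySem.Chars.split₀
        (PySem.Chars.replace (PySem.Chars.replace (PySem.Chars.lower text.toList) ['/'] [' '])
          ['-'] [' '])).foldl pvG PySem.Set.empty = _
    rw [pvReplace_both, pvSplit₀_eq]
    simpa using pvMain (PySem.Chars.lower text.toList) [] PySem.Set.empty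
  have hB' := pvAlt_eq_M (PySem.Chars.lower text.toList) [] PySem.Set.empty
  exact hA'.trans hB'.symm
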